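-- pv_equiv track=rewrite | github.com/GVCUTV/PM_ASF | etl/9_enrich_feedback_cols.py | _has_fail_then_success
-- ===== SOURCE A (Python) =====
-- FAIL_TOKENS = {
--     "failure",
--     "failed",
--     "cancelled",
--     "canceled",
--     "timed_out",
--     "action_required",
--     "error",
--     "startup_failure",
-- }
--
-- SUCCESS_TOKENS = {"success", "passed", "neutral"}
--
-- def _has_fail_then_success(states):
--     seen_fail = False
--     for raw in states:
--         token = str(raw or "").strip().lower()
--         if not token:
--             continue
--         if token in FAIL_TOKENS:
--             seen_fail = True
--             continue
--         if seen_fail and token in SUCCESS_TOKENS: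
--             return True
--     return False
-- ===== SOURCE B (Python) =====
-- FAIL_TOKENS = {
--     "failure",
--     "failed",
--     "cancelled",
--     "canceled",
--     "timed_out",
--     "action_required",
--     "error",
--     "startup_failure",
-- }
--
-- SUCCESS_TOKENS = {"success", "passed", "neutral"}
--
-- def _has_fail_then_success(states):
--     # Positional formulation: a fail-then-success exists iff the position of the
--     # FIRST fail token is strictly before the position of the LAST success token.
--     tokens = [str(r or "").strip().lower() for r in states]
--     fail_pos = [i for i, t in enumerate(tokens) if t in FAIL_TOKENS]
--     succ_pos = [i for i, t in enumerate(tokens) if t in SUCCESS_TOKENS]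
--     return bool(fail_pos) and bool(succ_pos) and fail_pos[0] < succ_pos[-1]
-- ===== Notes on version B (the rewrite author's own statement) =====
-- stated objective: alternative
-- what changed: Replaces the flag-carrying scan with a positional characterization: collect the indices of fail and success tokens and return whether the first fail index precedes the last success index.
import Mathlib
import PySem

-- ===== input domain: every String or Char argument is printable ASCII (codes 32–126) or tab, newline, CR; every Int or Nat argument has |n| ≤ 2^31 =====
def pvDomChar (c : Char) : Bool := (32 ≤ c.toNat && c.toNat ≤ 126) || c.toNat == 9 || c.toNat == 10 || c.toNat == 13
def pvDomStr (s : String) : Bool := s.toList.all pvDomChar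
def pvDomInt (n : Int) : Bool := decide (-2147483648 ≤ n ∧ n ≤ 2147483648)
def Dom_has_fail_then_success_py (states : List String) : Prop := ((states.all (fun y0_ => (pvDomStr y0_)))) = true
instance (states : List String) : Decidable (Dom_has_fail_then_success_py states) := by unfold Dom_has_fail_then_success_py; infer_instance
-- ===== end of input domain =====

-- B replaces A's flag-carrying scan by a positional characterization: the indices of
-- fail tokens and of success tokens are collected, and the answer is whether the
-- first fail index is strictly before the last success index.

-- ===== PORT A =====
def pvFailTokens : List String :=
  ["failure", "failed", "cancelled", "canceled", "timed_out",
   "action_required", "error", "startup_failure"]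

def pvSuccessTokens : List String := ["success", "passed", "neutral"]

-- token = str(raw or "").strip().lower()  (on strings, `raw or ""` is raw)
def pvNorm (raw : String) : String := PySem.Str.lower (PySem.Str.strip raw)

-- the for-loop with the carried seen_fail flag
def pvLoopA (states : List String) (seenFail : Bool) : Bool :=
  match states with
  | [] => false
  | raw :: rest =>
    let token := pvNorm raw
    if token = "" then pvLoopA rest seenFail
    else if token ∈ pvFailTokens then pvLoopA rest true
    else if seenFail && decide (token ∈ pvSuccessTokens) then true
    else pvLoopA rest seenFail

def has_fail_then_success_py (states : List String) : Bool :=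
  pvLoopA states false

-- ===== PORT B =====
-- fail_pos = [i for i, t in enumerate(tokens) if t in FAIL_TOKENS]  (and dually)
def pvFailPos (tokens : List String) (s : Int) : List Int :=
  ((PySem.List.enumerate tokens s).filter (fun p => decide (p.2 ∈ pvFailTokens))).map Prod.fst

def pvSuccPos (tokens : List String) (s : Int) : List Int :=
  ((PySem.List.enumerate tokens s).filter (fun p => decide (p.2 ∈ pvSuccessTokens))).map Prod.fst

-- bool(fail_pos) and bool(succ_pos) and fail_pos[0] < succ_pos[-1]
def has_fail_then_success_py_alt (states : List String) : Bool :=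
  let tokens := states.map pvNorm
  match (pvFailPos tokens 0).head?, (pvSuccPos tokens 0).getLast? with
  | some f, some s => decide (f < s)
  | _, _ => false

-- ===== PRECONDITION & SPEC =====
def Spec_has_fail_then_success_py (states : List String) (out : Bool) : Prop := out = has_fail_then_success_py_alt states
instance (states : List String) (out : Bool) : Decidable (Spec_has_fail_then_success_py states out) := by unfold Spec_has_fail_then_success_py; infer_instance

-- ===== CLAIM (what is proved, stated in full; the proofs are below) =====
def Claim_equal_has_fail_then_success_py : Prop := ∀ (states : List String), Dom_has_fail_then_success_py states → Spec_has_fail_then_success_py states (has_fail_then_success_py states)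

-- ===== LEMMAS AND PROOFS =====

-- B's compare step, abstracted over the two option results
def pvCmp : Option Int → Option Int → Bool
  | some f, some s => decide (f < s)
  | _, _ => false

theorem pvDisjointMem (t : String) (h : t ∈ pvFailTokens) : t ∉ pvSuccessTokens := by
  fin_cases h <;> decide

theorem pvFailPos_cons (t : String) (rest : List String) (s : Int) :
    pvFailPos (t :: rest) s =
      if t ∈ pvFailTokens then s :: pvFailPos rest (s + 1) else pvFailPos rest (s + 1) := by
  simp only [pvFailPos, PySem.List.enumerate_cons, List.filter_cons]
  split_ifs with h <;> simp_all

theorem pvSuccPos_cons (t : String) (rest : List String) (s : Int) :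
    pvSuccPos (t :: rest) s =
      if t ∈ pvSuccessTokens then s :: pvSuccPos rest (s + 1) else pvSuccPos rest (s + 1) := by
  simp only [pvSuccPos, PySem.List.enumerate_cons, List.filter_cons]
  split_ifs with h <;> simp_all

theorem pvFailPos_ge (tokens : List String) (s : Int) (x : Int) (hx : x ∈ pvFailPos tokens s) : s ≤ x := by
  simp only [pvFailPos, List.mem_map, List.mem_filter] at hx
  obtain ⟨p, ⟨hp, _⟩, rfl⟩ := hx
  rw [PySem.List.mem_enumerate_iff] at hp
  obtain ⟨k, hk, rfl⟩ := hp
  simp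

theorem pvSuccPos_ge (tokens : List String) (s : Int) (x : Int) (hx : x ∈ pvSuccPos tokens s) : s ≤ x := by
  simp only [pvSuccPos, List.mem_map, List.mem_filter] at hx
  obtain ⟨p, ⟨hp, _⟩, rfl⟩ := hx
  rw [PySem.List.mem_enumerate_iff] at hp
  obtain ⟨k, hk, rfl⟩ := hp
  simp

-- succ_pos is nonempty exactly when some success token occurs
theorem pvSuccPos_isSome_iff (tokens : List String) (s : Int) :
    (pvSuccPos tokens s).getLast?.isSome = tokens.any (fun t => decide (t ∈ pvSuccessTokens)) := by
  induction tokens generalizing s with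
  | nil => simp [pvSuccPos]
  | cons t rest ih =>
    rw [pvSuccPos_cons]
    by_cases h : t ∈ pvSuccessTokens
    · simp [h]
    · simp [h, ih]

-- A's loop on the token list; the empty token is in neither token set,
-- so skipping it is the same as falling through both branches
def pvTokLoopA (tokens : List String) (seenFail : Bool) : Bool :=
  match tokens with
  | [] => false
  | t :: rest =>
    if t ∈ pvFailTokens then pvTokLoopA rest true
    else if seenFail && decide (t ∈ pvSuccessTokens) then true
    else pvTokLoopA rest seenFail

theorem pvLoopA_eq_tok (states : List String) (b : Bool) :
    pvLoopA states b = pvTokLoopA (states.map pvNorm) b := by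
  induction states generalizing b with
  | nil => simp [pvLoopA, pvTokLoopA]
  | cons raw rest ih =>
    rw [List.map_cons, pvLoopA, pvTokLoopA]
    by_cases h : pvNorm raw = ""
    · rw [if_pos h, h]
      rw [if_neg (by decide : ¬ ("" ∈ pvFailTokens)),
          if_neg (by cases b <;> decide : ¬ ((b && decide ("" ∈ pvSuccessTokens)) = true))]
      exact ih b
    · rw [if_neg h]
      by_cases hf : pvNorm raw ∈ pvFailTokens
      · rw [if_pos hf, if_pos hf, ih]
      · rw [if_neg hf, if_neg hf]
        by_cases hs : (b && decide (pvNorm raw ∈ pvSuccessTokens)) = true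
        · rw [if_pos hs, if_pos hs]
        · rw [if_neg hs, if_neg hs, ih]

-- when the fail flag is set, A's remaining loop is an "any success token" scan
theorem pvTokLoopA_true (tokens : List String) :
    pvTokLoopA tokens true = tokens.any (fun t => decide (t ∈ pvSuccessTokens)) := by
  induction tokens with
  | nil => simp [pvTokLoopA]
  | cons t rest ih =>
    rw [pvTokLoopA, List.any_cons]
    by_cases h : t ∈ pvFailTokens
    · have hs : t ∉ pvSuccessTokens := pvDisjointMem t h
      simp [h, hs, ih]
    · by_cases hs : t ∈ pvSuccessTokens
      · simp [h, hs]
      · simp [h, hs, ih]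

theorem pvTokLoopA_eq_cmp (tokens : List String) (s : Int) :
    pvTokLoopA tokens false = pvCmp (pvFailPos tokens s).head? (pvSuccPos tokens s).getLast? := by
  induction tokens generalizing s with
  | nil => simp [pvTokLoopA, pvFailPos, pvSuccPos, pvCmp]
  | cons t rest ih =>
    rw [pvFailPos_cons, pvSuccPos_cons, pvTokLoopA]
    by_cases h : t ∈ pvFailTokens
    · have hs : t ∉ pvSuccessTokens := pvDisjointMem t h
      rw [if_pos h, if_pos h, if_neg hs, List.head?_cons]
      rw [pvTokLoopA_true, ← pvSuccPos_isSome_iff rest (s + 1)]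
      cases hsp : (pvSuccPos rest (s + 1)).getLast? with
      | none => simp [pvCmp]
      | some v =>
        have hv : s + 1 ≤ v :=
          pvSuccPos_ge rest (s + 1) v (List.mem_of_getLast? hsp)
        simp only [Option.isSome_some, pvCmp]
        symm
        simp only [decide_eq_true_eq]
        omega
    · rw [if_neg h, if_neg h,
          if_neg (by simp : ¬ ((false && decide (t ∈ pvSuccessTokens)) = true)), ih (s + 1)]
      by_cases hs : t ∈ pvSuccessTokens
      · rw [if_pos hs, List.getLast?_cons]
        cases hfp : (pvFailPos rest (s + 1)).head? with
        | none => simp [pvCmp]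
        | some f =>
          have hf : s + 1 ≤ f :=
            pvFailPos_ge rest (s + 1) f (List.mem_of_head? hfp)
          cases hsp : (pvSuccPos rest (s + 1)).getLast? with
          | none =>
            simp only [pvCmp, Option.getD_none]
            symm
            simp only [decide_eq_false_iff_not]
            omega
          | some v => simp [pvCmp, Option.getD_some]
      · rw [if_neg hs]

-- ===== VERDICT (by name: the statement is the Claim_ definition above) =====
theorem has_fail_then_success_py_spec : Claim_equal_has_fail_then_success_py := by
  intro states _
  unfold Spec_has_fail_then_success_py has_fail_then_success_py has_fail_then_success_py_alt
  rw [pvLoopA_eq_tok, pvTokLoopA_eq_cmp (states.map pvNorm) 0]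
  rfl
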